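-- pv_equiv track=rewrite | github.com/cooneycw/NHLapiV3 | src_code/utils/utils.py | game_time_to_period_time
-- ===== SOURCE A (Python) =====
-- def game_time_to_period_time(game_time_seconds):
--     """
--     Converts a game time index in seconds to a hockey period time string "mm:ss".
--
--     Parameters:
--     - game_time_seconds (int): Game time index in seconds.
--
--     Returns:
--     - tuple: (period (int), time_str (str) in "mm:ss" format).
--
--     Raises:
--     - ValueError: If the game_time_seconds is out of expected range.
--     """
--     # Define the lengths of each period in seconds
--     PERIOD_LENGTHS = {
--         1: 20 * 60,  # 20 minutes
--         2: 20 * 60,  # 20 minutes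
--         3: 20 * 60,  # 20 minutes
--         4: 5 * 60,   # Overtime period: 5 minutes
--         # 5: 0,     # Shootout (ignored in elapsed time)
--     }
--
--     # Calculate the total game time in seconds (excluding shootouts)
--     total_game_seconds = sum(PERIOD_LENGTHS.values())
--
--     # Validate the input
--     if not isinstance(game_time_seconds, int):
--         raise ValueError("Game time must be an integer representing seconds.")
--
--     if not (0 <= game_time_seconds <= total_game_seconds):
--         raise ValueError(f"Game time must be between 0 and {total_game_seconds} seconds.")
--
--     # Edge case: Exactly at the end of the game
--     if game_time_seconds == total_game_seconds:
--         return max(PERIOD_LENGTHS.keys()), "0:00"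
--
--     # Iterate through each period to find where the game_time_seconds falls
--     cumulative_seconds = 0
--     for period in sorted(PERIOD_LENGTHS.keys()):
--         period_length = PERIOD_LENGTHS[period]
--         if cumulative_seconds + period_length > game_time_seconds:
--             # Calculate time remaining in the current period
--             time_into_period = game_time_seconds - cumulative_seconds
--             time_remaining_in_period = period_length - time_into_period
--
--             minutes = time_remaining_in_period // 60
--             seconds = time_remaining_in_period % 60
--
--             return period, f"{int(minutes):02d}:{int(seconds):02d}"
--
--         cumulative_seconds += period_length
--
--     # If game_time_seconds doesn't fall into any period (shouldn't happen), raise an error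
--     raise ValueError("Game time does not correspond to any valid period.")
-- ===== SOURCE B (Python) =====
-- def game_time_to_period_time(game_time_seconds):
--     """Closed-form version: same validation, direct arithmetic instead of the cumulative loop."""
--     if not isinstance(game_time_seconds, int):
--         raise ValueError("Game time must be an integer representing seconds.")
--     if not (0 <= game_time_seconds <= 3900):
--         raise ValueError("Game time must be between 0 and 3900 seconds.")
--     if game_time_seconds == 3900:
--         return 4, "0:00"
--     if game_time_seconds < 3600:
--         period = game_time_seconds // 1200 + 1
--         remaining = 1200 - game_time_seconds % 1200
--     else:
--         period = 4
--         remaining = 3900 - game_time_seconds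
--     minutes, seconds = divmod(remaining, 60)
--     return period, f"{minutes:02d}:{seconds:02d}"
-- ===== Notes on version B (the rewrite author's own statement) =====
-- stated objective: simpler
-- what changed: Replaced the dict of period lengths, the sum over its values and the cumulative-sum loop over sorted periods with direct closed-form arithmetic (period = t//1200+1, remaining = 1200 - t%1200, overtime handled by one branch).
import Mathlib
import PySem

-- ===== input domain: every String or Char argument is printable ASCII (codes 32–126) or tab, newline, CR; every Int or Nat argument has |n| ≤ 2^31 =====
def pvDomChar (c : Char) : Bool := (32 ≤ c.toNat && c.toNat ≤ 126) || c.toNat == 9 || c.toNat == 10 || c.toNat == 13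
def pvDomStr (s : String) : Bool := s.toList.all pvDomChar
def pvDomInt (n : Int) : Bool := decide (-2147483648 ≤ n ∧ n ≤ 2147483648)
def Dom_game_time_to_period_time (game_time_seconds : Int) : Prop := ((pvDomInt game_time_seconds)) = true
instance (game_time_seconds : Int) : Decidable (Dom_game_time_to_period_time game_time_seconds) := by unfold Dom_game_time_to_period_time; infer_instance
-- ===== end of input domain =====

-- B replaces A's dict of period lengths, its summed total and the cumulative-sum loop by
-- direct closed-form arithmetic (simpler; same exact behaviour on 0 ≤ t ≤ 3900).

-- ===== PORT A =====
-- the PERIOD_LENGTHS dict, in insertion order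
def pvPeriods : PySem.Dict Int Int :=
  PySem.Dict.ofList [(1, 20 * 60), (2, 20 * 60), (3, 20 * 60), (4, 5 * 60)]

-- f"{int(m):02d}" zero-padding (exact for the nonnegative values reached inside Pre_)
def pvPad2 (n : Int) : List Char :=
  let s := PySem.Int.toChars n
  List.replicate (2 - s.length) '0' ++ s

-- the 'for period in sorted(PERIOD_LENGTHS.keys())' loop with its running cumulative_seconds;
-- the final unreachable 'raise' becomes the default (0, "") outside Pre_
def pvLoopA (t : Int) : List Int → Int → Int × String
  | [], _ => (0, "")
  | p :: rest, cum =>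
    let periodLength := pvPeriods.getD p 0
    if cum + periodLength > t then
      let timeInto := t - cum
      let rem := periodLength - timeInto
      let minutes := PySem.Int.floordiv rem 60
      let seconds := PySem.Int.mod rem 60
      (p, String.mk (pvPad2 minutes ++ ':' :: pvPad2 seconds))
    else pvLoopA t rest (cum + periodLength)

def game_time_to_period_time (game_time_seconds : Int) : Int × String :=
  let totalGameSeconds := pvPeriods.values.sum
  if game_time_seconds == totalGameSeconds then
    ((PySem.List.max? pvPeriods.keys (fun k => k)).getD 0, "0:00")
  else
    pvLoopA game_time_seconds (PySem.List.sorted pvPeriods.keys (fun k => k)) 0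

-- ===== PORT B =====
-- (B's f"{m:02d}" formatting is the same pvPad2 helper)
def game_time_to_period_time_alt (game_time_seconds : Int) : Int × String :=
  if game_time_seconds == 3900 then (4, "0:00")
  else
    let pr : Int × Int :=
      if game_time_seconds < 3600 then
        (PySem.Int.floordiv game_time_seconds 1200 + 1,
         1200 - PySem.Int.mod game_time_seconds 1200)
      else (4, 3900 - game_time_seconds)
    let minutes := PySem.Int.floordiv pr.2 60
    let seconds := PySem.Int.mod pr.2 60
    (pr.1, String.mk (pvPad2 minutes ++ ':' :: pvPad2 seconds))

-- ===== PRECONDITION & SPEC =====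
-- Python A raises ValueError outside 0 ≤ t ≤ 3900 (total_game_seconds = 3900)
def Pre_game_time_to_period_time (game_time_seconds : Int) : Prop :=
  0 ≤ game_time_seconds ∧ game_time_seconds ≤ 3900
instance (game_time_seconds : Int) : Decidable (Pre_game_time_to_period_time game_time_seconds) := by
  unfold Pre_game_time_to_period_time; infer_instance
def pvWitness_game_time_to_period_time : Int := 1234

def Spec_game_time_to_period_time (game_time_seconds : Int) (out : Int × String) : Prop := out = game_time_to_period_time_alt game_time_seconds
instance (game_time_seconds : Int) (out : Int × String) : Decidable (Spec_game_time_to_period_time game_time_seconds out) := by unfold Spec_game_time_to_period_time; infer_instance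

-- ===== CLAIM (what is proved, stated in full; the proofs are below) =====
def Claim_equal_game_time_to_period_time : Prop := ∀ (game_time_seconds : Int), Dom_game_time_to_period_time game_time_seconds → Pre_game_time_to_period_time game_time_seconds → Spec_game_time_to_period_time game_time_seconds (game_time_to_period_time game_time_seconds)

-- ===== LEMMAS AND PROOFS =====

-- both formatted results coincide once period and remaining-seconds values coincide
theorem pvBranchEq (p1 p2 r1 r2 : Int) (hp : p1 = p2) (h : r1 = r2) :
    ((p1, String.mk (pvPad2 (PySem.Int.floordiv r1 60) ++ ':' :: pvPad2 (PySem.Int.mod r1 60))) : Int × String) =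
    (p2, String.mk (pvPad2 (PySem.Int.floordiv r2 60) ++ ':' :: pvPad2 (PySem.Int.mod r2 60))) := by
  subst hp h; rfl

set_option maxHeartbeats 1000000 in
theorem game_time_to_period_time_spec : Claim_equal_game_time_to_period_time := by
  intro t _ hpre
  obtain ⟨h0, h39⟩ := hpre
  unfold Spec_game_time_to_period_time
  have htot : pvPeriods.values.sum = 3900 := by decide
  have hmax : (PySem.List.max? pvPeriods.keys (fun k => k)).getD 0 = 4 := by decide
  have hsorted : PySem.List.sorted pvPeriods.keys (fun k => k) = [1, 2, 3, 4] := by decide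
  have g1 : pvPeriods.getD 1 0 = 1200 := by decide
  have g2 : pvPeriods.getD 2 0 = 1200 := by decide
  have g3 : pvPeriods.getD 3 0 = 1200 := by decide
  have g4 : pvPeriods.getD 4 0 = 300 := by decide
  by_cases h : t = 3900
  · subst h; decide
  · have hfd : PySem.Int.floordiv t 1200 = t / 1200 :=
      PySem.Int.floordiv_eq_ediv_of_pos (by norm_num)
    have hmd : PySem.Int.mod t 1200 = t % 1200 :=
      PySem.Int.mod_eq_emod_of_pos (by norm_num)
    simp only [game_time_to_period_time, game_time_to_period_time_alt, htot, hmax, hsorted,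
      beq_iff_eq, h, if_false]
    simp only [pvLoopA, g1, g2, g3, g4, hfd, hmd]
    split_ifs with h1 h2 h3 h4 h5 <;>
      first
      | exact pvBranchEq _ _ _ _ (by omega) (by omega)
      | omega
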